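-- pv_equiv track=rewrite | github.com/GrootBeard/ObjectTracker | filters/jpda.py | __generate_tau_i_events
-- ===== SOURCE A (Python) =====
-- from ast import Dict, List
--
-- def __generate_tau_i_events(t_index, mt_index, assignments) -> List(List(int)):
--     M = assignments.copy()
--     M.pop(t_index)
--     u = [] if mt_index == 0 else [mt_index]
--     if 0 in u:
--         u.remove(0)
--
--     events = []
--     __enumerate_events(M, events, u, [])
--
--     for e in events:
--         e.insert(t_index, mt_index)
--
--     return events
--
-- def __enumerate_events(M, E, u, v, d=0) -> None:
--     if d is len(M):
--         # Try pre-allocating the array v to be a zeros array and then set value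
--         # at index d
--         E.append(v)
--         return
--
--     for i in M[d]:
--         # loop over i in M[d] \ u
--         if i not in u:
--             vnew = v.copy()
--             vnew.append(i)
--             unew = u.copy()
--             # feasible events can have multiple tracks with no measurement assigned
--             if i != 0:
--                 unew.append(i)
--             __enumerate_events(M, E, unew, vnew, d+1)
-- ===== SOURCE B (Python) =====
-- def __generate_tau_i_events(t_index, mt_index, assignments):
--     rows = list(assignments)
--     rows.pop(t_index)
--     used0 = set() if mt_index == 0 else {mt_index}
--     partials = [([], used0)]
--     for row in rows:
--         partials = [(v + [i], used | {i} if i != 0 else used)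
--                     for v, used in partials for i in row if i not in used]
--     events = []
--     for v, _ in partials:
--         v.insert(t_index, mt_index)
--         events.append(v)
--     return events
-- ===== Notes on version B (the rewrite author's own statement) =====
-- stated objective: alternative
-- what changed: Replaces the mutually recursive depth-first enumeration (recursion over depth d with a per-row for-loop and an output list mutated through the recursion) by a single iterative level-by-level fold: a list of partial (vector, used-set) states is expanded row by row with a comprehension, yielding the same events in the same lexicographic order.
import Mathlib
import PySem

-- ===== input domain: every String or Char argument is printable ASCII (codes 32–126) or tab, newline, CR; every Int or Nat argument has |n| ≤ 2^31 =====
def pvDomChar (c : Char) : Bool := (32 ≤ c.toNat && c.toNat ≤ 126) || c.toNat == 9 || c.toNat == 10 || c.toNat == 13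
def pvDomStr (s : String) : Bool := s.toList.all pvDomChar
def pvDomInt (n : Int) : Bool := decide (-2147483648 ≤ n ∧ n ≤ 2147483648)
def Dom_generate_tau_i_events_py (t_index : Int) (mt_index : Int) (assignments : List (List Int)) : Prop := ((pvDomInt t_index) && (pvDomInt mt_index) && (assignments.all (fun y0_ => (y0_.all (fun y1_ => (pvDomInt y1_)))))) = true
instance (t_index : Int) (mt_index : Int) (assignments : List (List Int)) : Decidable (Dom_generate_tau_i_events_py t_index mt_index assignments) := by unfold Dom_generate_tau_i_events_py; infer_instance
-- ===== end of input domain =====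

-- B replaces A's mutually recursive DFS by an iterative level-by-level expansion of partial states
-- (objective: alternative decomposition, same output in the same order).

-- ===== PORT A =====
-- __enumerate_events: the recursion over depth d becomes structural recursion over the remaining
-- rows of M (d is len(M) ↔ no rows remain; exact since Pre_ bounds len(M) ≤ 256, where CPython's
-- small-int cache makes `is` behave as `==`); the `for i in M[d]` loop is the mutual pvRowA.
mutual
def pvEnumA (M : List (List Int)) (E : List (List Int)) (u v : List Int) : List (List Int) :=
  match M with
  | [] => E ++ [v]                                   -- E.append(v)
  | row :: rest => pvRowA rest row E u v
def pvRowA (rest : List (List Int)) (row : List Int) (E : List (List Int)) (u v : List Int) : List (List Int) :=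
  match row with
  | [] => E
  | i :: is =>
    if u.contains i then pvRowA rest is E u v
    else pvRowA rest is
      (pvEnumA rest E (if i != 0 then u ++ [i] else u) (v ++ [i])) u v
end

def generate_tau_i_events_py (t_index : Int) (mt_index : Int) (assignments : List (List Int)) : List (List Int) :=
  match PySem.List.pop? assignments t_index with     -- M = assignments.copy(); M.pop(t_index)
  | none => []                                       -- IndexError, excluded by Pre_
  | some (_, M) =>
    let u : List Int := if mt_index = 0 then [] else [mt_index]
    let u := if u.contains 0 then (PySem.List.remove? u 0).getD u else u
    let events := pvEnumA M [] u []
    events.map (fun e => PySem.List.insert e t_index mt_index)   -- e.insert(t_index, mt_index)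

-- ===== PORT B =====
-- one level of expansion: extend every partial state by every feasible entry of the row
def pvStepB (row : List Int) (ps : List (List Int × PySem.Set Int)) : List (List Int × PySem.Set Int) :=
  ps.flatMap (fun p =>
    (row.filter (fun i => !(PySem.Set.contains p.2 i))).map
      (fun i => (p.1 ++ [i], if i != 0 then PySem.Set.add p.2 i else p.2)))

def generate_tau_i_events_py_alt (t_index : Int) (mt_index : Int) (assignments : List (List Int)) : List (List Int) :=
  match PySem.List.pop? assignments t_index with     -- rows = list(assignments); rows.pop(t_index)
  | none => []
  | some (_, rows) =>
    let used0 : PySem.Set Int :=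
      if mt_index = 0 then PySem.Set.empty else PySem.Set.add PySem.Set.empty mt_index
    let partials := rows.foldl (fun ps row => pvStepB row ps) [([], used0)]
    partials.map (fun p => PySem.List.insert p.1 t_index mt_index)

-- ===== PRECONDITION & SPEC =====
-- Pre_ excludes exactly the inputs where Python A raises: t_index out of pop range (IndexError),
-- and len(assignments) > 257, where `d is len(M)` is False for equal ints outside CPython's
-- small-int cache, so the recursion overruns M and raises (IndexError/RecursionError).
def Pre_generate_tau_i_events_py (t_index : Int) (mt_index : Int) (assignments : List (List Int)) : Prop :=
  (-(assignments.length : Int) ≤ t_index ∧ t_index < (assignments.length : Int)) ∧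
    assignments.length ≤ 257
instance (t_index : Int) (mt_index : Int) (assignments : List (List Int)) : Decidable (Pre_generate_tau_i_events_py t_index mt_index assignments) := by unfold Pre_generate_tau_i_events_py; infer_instance

def pvWitness_generate_tau_i_events_py : Int × Int × List (List Int) := (0, 1, [[0, 1], [0, 2]])

def Spec_generate_tau_i_events_py (t_index : Int) (mt_index : Int) (assignments : List (List Int)) (out : List (List Int)) : Prop := out = generate_tau_i_events_py_alt t_index mt_index assignments
instance (t_index : Int) (mt_index : Int) (assignments : List (List Int)) (out : List (List Int)) : Decidable (Spec_generate_tau_i_events_py t_index mt_index assignments out) := by unfold Spec_generate_tau_i_events_py; infer_instance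

-- ===== CLAIM (what is proved, stated in full; the proofs are below) =====
def Claim_equal_generate_tau_i_events_py : Prop := ∀ (t_index : Int) (mt_index : Int) (assignments : List (List Int)), Dom_generate_tau_i_events_py t_index mt_index assignments → Pre_generate_tau_i_events_py t_index mt_index assignments → Spec_generate_tau_i_events_py t_index mt_index assignments (generate_tau_i_events_py t_index mt_index assignments)

-- ===== LEMMAS AND PROOFS =====

def pvExpand (rows : List (List Int)) (ps : List (List Int × PySem.Set Int)) : List (List Int × PySem.Set Int) :=
  rows.foldl (fun ps row => pvStepB row ps) ps

theorem pvStepB_append (row : List Int) (ps qs : List (List Int × PySem.Set Int)) :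
    pvStepB row (ps ++ qs) = pvStepB row ps ++ pvStepB row qs := by
  simp [pvStepB]

theorem pvExpand_append (rows : List (List Int)) (ps qs : List (List Int × PySem.Set Int)) :
    pvExpand rows (ps ++ qs) = pvExpand rows ps ++ pvExpand rows qs := by
  induction rows generalizing ps qs with
  | nil => rfl
  | cons row rest ih => simp [pvExpand, List.foldl] at *; rw [pvStepB_append, ih]

theorem pvExpand_nil (rows : List (List Int)) : pvExpand rows [] = [] := by
  induction rows with
  | nil => rfl
  | cons row rest ih => simp [pvExpand, List.foldl, pvStepB] at *; exact ih

theorem pvContains_step (u : List Int) (s : PySem.Set Int) (i : Int)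
    (h : ∀ j : Int, j ∈ u ↔ j ∈ s) :
    ∀ j : Int, (j ∈ (if i != 0 then u ++ [i] else u))
      ↔ j ∈ (if i != 0 then PySem.Set.add s i else s) := by
  intro j
  by_cases hi : i = 0
  · simpa [hi] using h j
  · simp [hi, PySem.Set.mem_add, h j]
    try tauto

theorem pvEnum_eq_expand (rows : List (List Int)) :
    ∀ (E : List (List Int)) (u v : List Int) (s : PySem.Set Int),
      (∀ j : Int, j ∈ u ↔ j ∈ s) →
      pvEnumA rows E u v = E ++ (pvExpand rows [(v, s)]).map Prod.fst := by
  induction rows with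
  | nil => intro E u v s _; simp [pvEnumA, pvExpand]
  | cons row rest ih =>
    have inner : ∀ (row' : List Int) (E : List (List Int)) (u v : List Int) (s : PySem.Set Int),
        (∀ j : Int, j ∈ u ↔ j ∈ s) →
        pvRowA rest row' E u v = E ++ (pvExpand rest (pvStepB row' [(v, s)])).map Prod.fst := by
      intro row'
      induction row' with
      | nil =>
        intro E u v s _
        simp [pvRowA, pvStepB, pvExpand_nil]
      | cons i is ihr =>
        intro E u v s h
        by_cases hc : i ∈ u
        · have hcs : i ∈ s := (h i).mp hc
          rw [pvRowA, if_pos (by simpa using hc), ihr E u v s h]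
          simp [pvStepB, List.filter_cons, hcs]
        · have hcs : i ∉ s := fun m => hc ((h i).mpr m)
          rw [pvRowA, if_neg (by simpa using hc)]
          rw [ihr _ u v s h]
          rw [ih E (if i != 0 then u ++ [i] else u) (v ++ [i])
                (if i != 0 then PySem.Set.add s i else s) (pvContains_step u s i h)]
          have hsplit : pvStepB (i :: is) [(v, s)]
              = [(v ++ [i], if i != 0 then PySem.Set.add s i else s)] ++ pvStepB is [(v, s)] := by
            simp [pvStepB, List.filter_cons, hcs]
          rw [hsplit, pvExpand_append]
          simp [List.append_assoc]
    intro E u v s h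
    rw [show pvEnumA (row :: rest) E u v = pvRowA rest row E u v from by rw [pvEnumA]]
    rw [inner row E u v s h]
    rfl

set_option maxRecDepth 4000 in
theorem pv_ports_agree (t_index mt_index : Int) (assignments : List (List Int)) :
    generate_tau_i_events_py t_index mt_index assignments
      = generate_tau_i_events_py_alt t_index mt_index assignments := by
  unfold generate_tau_i_events_py generate_tau_i_events_py_alt
  cases hp : PySem.List.pop? assignments t_index with
  | none => rfl
  | some r =>
    cases r with
    | mk x M =>
      simp only
      by_cases hm : mt_index = 0
      · rw [pvEnum_eq_expand M []
          (if (if mt_index = 0 then ([] : List Int) else [mt_index]).contains 0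
            then ((PySem.List.remove? (if mt_index = 0 then ([] : List Int) else [mt_index]) 0).getD
              (if mt_index = 0 then ([] : List Int) else [mt_index]))
            else (if mt_index = 0 then ([] : List Int) else [mt_index])) []
          (if mt_index = 0 then PySem.Set.empty else PySem.Set.add PySem.Set.empty mt_index)
          (by intro j; simp [hm, PySem.Set.empty])]
        simp [pvExpand, List.map_map]
      · have h0 : ¬ (0 : Int) = mt_index := fun e => hm e.symm
        rw [pvEnum_eq_expand M []
          (if (if mt_index = 0 then ([] : List Int) else [mt_index]).contains 0
            then ((PySem.List.remove? (if mt_index = 0 then ([] : List Int) else [mt_index]) 0).getD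
              (if mt_index = 0 then ([] : List Int) else [mt_index]))
            else (if mt_index = 0 then ([] : List Int) else [mt_index])) []
          (if mt_index = 0 then PySem.Set.empty else PySem.Set.add PySem.Set.empty mt_index)
          (by
            intro j
            simp [hm, h0, PySem.Set.add, PySem.Set.empty, PySem.Set.contains])]
        simp [pvExpand, List.map_map]

-- ===== VERDICT (by name: the statement is the Claim_ definition above) =====
theorem generate_tau_i_events_py_spec : Claim_equal_generate_tau_i_events_py := by
  intro t_index mt_index assignments _ _
  unfold Spec_generate_tau_i_events_py
  exact pv_ports_agree t_index mt_index assignments
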